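-- pv_equiv track=rewrite | github.com/mackenziejewell/SBSpolynya | functions.py | find_consecutive_values
-- ===== SOURCE A (Python) =====
-- def find_consecutive_values(arr):
--     # if not arr:
--     #     return []
--
--     result = []
--     start_index = 0
--     for i in range(1, len(arr)):
--         if arr[i] != arr[i - 1] + 1:
--             if i - start_index > 1:
--                 result.append((start_index, i - 1))
--             start_index = i
--     if len(arr) - start_index > 1:
--         result.append((start_index, len(arr) - 1))
--     return result
-- ===== SOURCE B (Python) =====
-- def find_consecutive_values(arr):
--     # Group indices by the key arr[i] - i, which is constant exactly on a
--     # maximal run of consecutive-by-1 values; keep groups of length > 1.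
--     groups = []  # list of (key, first_index, last_index)
--     for i, v in enumerate(arr):
--         k = v - i
--         if groups and groups[-1][0] == k:
--             kk, f, _ = groups[-1]
--             groups[-1] = (kk, f, i)
--         else:
--             groups.append((k, i, i))
--     return [(f, l) for _, f, l in groups if l > f]
-- ===== Notes on version B (the rewrite author's own statement) =====
-- stated objective: alternative
-- what changed: B replaces A's start_index state machine over range(1, len(arr)) by grouping indices on the invariant key arr[i]-i (constant exactly across a run of consecutive-by-1 values) and then filtering the groups of length > 1, itertools.groupby-style.
import Mathlib
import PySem

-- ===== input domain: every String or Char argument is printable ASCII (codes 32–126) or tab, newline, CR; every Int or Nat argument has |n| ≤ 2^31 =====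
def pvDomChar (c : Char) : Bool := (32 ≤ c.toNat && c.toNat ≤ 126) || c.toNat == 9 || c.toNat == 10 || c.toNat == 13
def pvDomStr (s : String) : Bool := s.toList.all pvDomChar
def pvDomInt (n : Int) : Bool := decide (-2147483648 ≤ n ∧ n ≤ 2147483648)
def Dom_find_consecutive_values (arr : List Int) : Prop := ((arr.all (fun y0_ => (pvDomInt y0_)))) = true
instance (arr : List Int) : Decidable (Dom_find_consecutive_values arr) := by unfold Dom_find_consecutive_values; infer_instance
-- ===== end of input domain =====

-- B groups indices by the key arr[i]-i (constant exactly on a run of consecutive values)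
-- instead of A's start_index state machine; objective: alternative/idiomatic, same cost.

-- ===== PORT A =====
-- A's loop body (named so the proofs can speak about one step of the fold)
def pvStepA (arr : List Int) (st : List (Int × Int) × Int) (i : Int) : List (Int × Int) × Int :=
  if PySem.List.pyGetD arr i 0 ≠ PySem.List.pyGetD arr (i - 1) 0 + 1 then
    ((if i - st.2 > 1 then st.1 ++ [(st.2, i - 1)] else st.1), i)
  else st

def find_consecutive_values (arr : List Int) : List (Int × Int) :=
  let n : Int := (arr.length : Int)
  let st := (PySem.List.pyRange 1 n).foldl (pvStepA arr) ([], 0)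
  if n - st.2 > 1 then st.1 ++ [(st.2, n - 1)] else st.1

-- ===== PORT B =====
-- B's loop body: extend the last group if the key matches, else open a new group
def pvStepB (groups : List (Int × Int × Int)) (p : Int × Int) : List (Int × Int × Int) :=
  let k := p.2 - p.1
  match groups.getLast? with
  | some (kk, f, _) =>
      if kk == k then groups.dropLast ++ [(kk, f, p.1)]
      else groups ++ [(k, p.1, p.1)]
  | none => groups ++ [(k, p.1, p.1)]

def find_consecutive_values_alt (arr : List Int) : List (Int × Int) :=
  let groups := (PySem.List.enumerate arr).foldl pvStepB []
  (groups.filter (fun g => decide (g.2.2 > g.2.1))).map (fun g => (g.2.1, g.2.2))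

-- ===== PRECONDITION & SPEC =====
def Spec_find_consecutive_values (arr : List Int) (out : List (Int × Int)) : Prop := out = find_consecutive_values_alt arr
instance (arr : List Int) (out : List (Int × Int)) : Decidable (Spec_find_consecutive_values arr out) := by unfold Spec_find_consecutive_values; infer_instance

-- ===== CLAIM (what is proved, stated in full; the proofs are below) =====
def Claim_equal_find_consecutive_values : Prop := ∀ (arr : List Int), Dom_find_consecutive_values arr → Spec_find_consecutive_values arr (find_consecutive_values arr)

-- ===== LEMMAS AND PROOFS =====

-- reference run-scanner: current start s, current index i, previous value prev
def pvRefRuns (s i prev : Int) : List Int → List (Int × Int)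
  | [] => if i - s > 1 then [(s, i - 1)] else []
  | x :: rest =>
      if x = prev + 1 then pvRefRuns s (i + 1) x rest
      else (if i - s > 1 then [(s, i - 1)] else []) ++ pvRefRuns i (i + 1) x rest

-- A's loop as structural recursion: returns (emitted pairs, final start_index)
def pvLoopA (s i prev : Int) : List Int → List (Int × Int) × Int
  | [] => ([], s)
  | x :: rest =>
      if x ≠ prev + 1 then
        let r := pvLoopA i (i + 1) x rest
        ((if i - s > 1 then [(s, i - 1)] else []) ++ r.1, r.2)
      else pvLoopA s (i + 1) x rest

-- B's groups as structural recursion: open group (kk, f, last = i-1)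
def pvGroups (kk f i : Int) : List Int → List (Int × Int × Int)
  | [] => [(kk, f, i - 1)]
  | x :: rest =>
      if kk = x - i then pvGroups kk f (i + 1) rest
      else (kk, f, i - 1) :: pvGroups (x - i) i (i + 1) rest

lemma pvLoopA_refRuns (rest : List Int) : ∀ s i prev,
    (if (i + (rest.length : Int)) - (pvLoopA s i prev rest).2 > 1 then
        (pvLoopA s i prev rest).1 ++ [((pvLoopA s i prev rest).2, i + (rest.length : Int) - 1)]
      else (pvLoopA s i prev rest).1)
    = pvRefRuns s i prev rest := by
  induction rest with
  | nil => intro s i prev; simp [pvLoopA, pvRefRuns]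
  | cons x rest ih =>
    intro s i prev
    have hl : i + ((x :: rest).length : Int) = (i + 1) + (rest.length : Int) := by
      push_cast [List.length_cons]; ring
    by_cases h : x = prev + 1
    · subst h
      simp only [pvLoopA, pvRefRuns, ne_eq, not_true_eq_false, if_false, if_true, hl]
      exact ih s (i + 1) (prev + 1)
    · simp only [pvLoopA, pvRefRuns, ne_eq, h, not_false_eq_true, if_true, if_false, hl]
      rw [← ih i (i + 1) x]
      split_ifs <;> simp

lemma pvGroups_refRuns (rest : List Int) : ∀ kk f i,
    ((pvGroups kk f i rest).filter (fun g => decide (g.2.2 > g.2.1))).map (fun g => (g.2.1, g.2.2))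
    = pvRefRuns f i (kk + i - 1) rest := by
  induction rest with
  | nil =>
    intro kk f i
    by_cases hc : f < i - 1
    · simp [pvGroups, pvRefRuns, hc, show i - f > 1 by omega]
    · simp [pvGroups, pvRefRuns, hc, show ¬ i - f > 1 by omega]
  | cons x rest ih =>
    intro kk f i
    by_cases h : kk = x - i
    · simp only [pvGroups, if_pos h, pvRefRuns,
        if_pos (show x = kk + i - 1 + 1 by omega)]
      have hrec := ih kk f (i + 1)
      rw [show kk + (i + 1) - 1 = x by omega] at hrec
      exact hrec
    · simp only [pvGroups, if_neg h, pvRefRuns,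
        if_neg (show ¬ x = kk + i - 1 + 1 by omega)]
      have hrec := ih (x - i) i (i + 1)
      rw [show x - i + (i + 1) - 1 = x by ring] at hrec
      by_cases hc : f < i - 1
      · simp [hc, show i - f > 1 by omega, hrec]
      · simp [hc, show ¬ i - f > 1 by omega, hrec]

lemma pvFoldA (rest : List Int) : ∀ (arr pre : List Int) (prev : Int),
    arr = pre ++ prev :: rest → ∀ (res : List (Int × Int)) (s : Int),
    ((PySem.List.pyRange ((pre.length : Int) + 1) ((arr.length : Int))).foldl (pvStepA arr) (res, s))
    = (res ++ (pvLoopA s ((pre.length : Int) + 1) prev rest).1, (pvLoopA s ((pre.length : Int) + 1) prev rest).2) := by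
  induction rest with
  | nil =>
    intro arr pre prev harr res s
    rw [show ((arr.length : Nat) : Int) = (pre.length : Int) + 1 by rw [harr]; push_cast [List.length_append, List.length_cons, List.length_nil]; ring]
    rw [PySem.List.pyRange_one_eq_nil (le_refl _)]
    simp [pvLoopA]
  | cons x rest ih =>
    intro arr pre prev harr res s
    have hab : (pre.length : Int) + 1 < ((arr.length : Nat) : Int) := by
      rw [harr]; push_cast [List.length_append, List.length_cons]; omega
    have h1 : PySem.List.pyGetD arr ((pre.length : Int) + 1) 0 = x := by
      rw [harr, show (pre.length : Int) + 1 = ((pre.length + 1 : Nat) : Int) by push_cast; ring,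
          PySem.List.pyGetD_natCast]
      simp [List.getD_eq_getElem?_getD]
    have h2 : PySem.List.pyGetD arr ((pre.length : Int) + 1 - 1) 0 = prev := by
      rw [harr, show (pre.length : Int) + 1 - 1 = ((pre.length : Nat) : Int) by ring,
          PySem.List.pyGetD_natCast]
      simp [List.getD_eq_getElem?_getD]
    have harr' : arr = (pre ++ [prev]) ++ x :: rest := by
      rw [harr, List.append_assoc, List.singleton_append]
    have key := ih arr (pre ++ [prev]) x harr'
    simp only [show (((pre ++ [prev]).length : Nat) : Int) = (pre.length : Int) + 1 by
      push_cast [List.length_append, List.length_cons, List.length_nil]; ring] at key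
    rw [PySem.List.pyRange_one_cons hab, List.foldl_cons]
    by_cases h : x = prev + 1
    · have hstate : pvStepA arr (res, s) ((pre.length : Int) + 1) = (res, s) := by
        unfold pvStepA
        rw [h1, h2]
        simp [h]
      rw [hstate, key res s]
      simp [pvLoopA, h]
    · have hstate : pvStepA arr (res, s) ((pre.length : Int) + 1)
          = ((if ((pre.length : Int) + 1) - s > 1 then res ++ [(s, (pre.length : Int) + 1 - 1)] else res),
             (pre.length : Int) + 1) := by
        unfold pvStepA
        rw [h1, h2]
        simp [h]
      rw [hstate, key _ ((pre.length : Int) + 1)]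
      simp only [pvLoopA, ne_eq, h, not_false_eq_true, if_true]
      split_ifs <;> simp

lemma pvFoldB (rest : List Int) : ∀ (G : List (Int × Int × Int)) (kk f i : Int),
    (PySem.List.enumerate rest i).foldl pvStepB (G ++ [(kk, f, i - 1)])
    = G ++ pvGroups kk f i rest := by
  induction rest with
  | nil => intro G kk f i; simp [PySem.List.enumerate, pvGroups]
  | cons x rest ih =>
    intro G kk f i
    rw [show PySem.List.enumerate (x :: rest) i = (i, x) :: PySem.List.enumerate rest (i + 1) by
      simp [PySem.List.enumerate]]
    rw [List.foldl_cons]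
    by_cases h : kk = x - i
    · have hstate : pvStepB (G ++ [(kk, f, i - 1)]) (i, x) = G ++ [(kk, f, i)] := by
        simp [pvStepB, h]
      have hrec := ih G kk f (i + 1)
      rw [show i + 1 - 1 = i by ring] at hrec
      rw [hstate, hrec]
      simp [pvGroups, h]
    · have hstate : pvStepB (G ++ [(kk, f, i - 1)]) (i, x)
          = (G ++ [(kk, f, i - 1)]) ++ [(x - i, i, i)] := by
        simp [pvStepB, h]
      have hrec := ih (G ++ [(kk, f, i - 1)]) (x - i) i (i + 1)
      rw [show i + 1 - 1 = i by ring] at hrec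
      rw [hstate, hrec]
      simp [pvGroups, h]

lemma pvA_ref (arr : List Int) :
    find_consecutive_values arr = match arr with
      | [] => []
      | a :: t => pvRefRuns 0 1 a t := by
  cases arr with
  | nil => rfl
  | cons a t =>
    simp only [find_consecutive_values]
    have key := pvFoldA t (a :: t) [] a rfl [] 0
    simp only [List.length_nil, Nat.cast_zero, zero_add, List.nil_append] at key
    rw [key]
    rw [show (((a :: t).length : Nat) : Int) = 1 + (t.length : Int) by
      push_cast [List.length_cons]; ring]
    simpa using pvLoopA_refRuns t 0 1 a

lemma pvB_ref (arr : List Int) :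
    find_consecutive_values_alt arr = match arr with
      | [] => []
      | a :: t => pvRefRuns 0 1 a t := by
  cases arr with
  | nil => rfl
  | cons a t =>
    simp only [find_consecutive_values_alt]
    rw [show PySem.List.enumerate (a :: t) 0 = (0, a) :: PySem.List.enumerate t 1 by
      simp [PySem.List.enumerate]]
    rw [List.foldl_cons]
    have hstate : pvStepB [] (0, a) = [] ++ [(a - 0, 0, 1 - 1)] := by
      simp [pvStepB]
    rw [hstate, pvFoldB t [] (a - 0) 0 1]
    have h2 := pvGroups_refRuns t (a - 0) 0 1
    rw [show a - 0 + 1 - 1 = a by ring] at h2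
    simpa using h2

-- ===== VERDICT (by name: the statement is the Claim_ definition above) =====
theorem find_consecutive_values_spec : Claim_equal_find_consecutive_values := by
  intro arr _
  unfold Spec_find_consecutive_values
  rw [pvA_ref, pvB_ref]
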